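-- pv_equiv track=rewrite | github.com/katrinamariehh/Exercise09 | recursion.py | find
-- ===== SOURCE A (Python) =====
-- def find(l, i):
--     if l == []:
--         return None
--     elif l[-1] == i:
--         return i
--     else:
--         l = l[0:-1]
--         return find(l, i)
-- ===== SOURCE B (Python) =====
-- def find(l, i):
--     for x in l:
--         if x == i:
--             return i
--     return None
-- ===== Notes on version B (the rewrite author's own statement) =====
-- stated objective: idiomatic
-- what changed: Replaces back-to-front recursion with repeated slicing (O(n^2) copying) by a single flat forward scan returning on first match.
import Mathlib
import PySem

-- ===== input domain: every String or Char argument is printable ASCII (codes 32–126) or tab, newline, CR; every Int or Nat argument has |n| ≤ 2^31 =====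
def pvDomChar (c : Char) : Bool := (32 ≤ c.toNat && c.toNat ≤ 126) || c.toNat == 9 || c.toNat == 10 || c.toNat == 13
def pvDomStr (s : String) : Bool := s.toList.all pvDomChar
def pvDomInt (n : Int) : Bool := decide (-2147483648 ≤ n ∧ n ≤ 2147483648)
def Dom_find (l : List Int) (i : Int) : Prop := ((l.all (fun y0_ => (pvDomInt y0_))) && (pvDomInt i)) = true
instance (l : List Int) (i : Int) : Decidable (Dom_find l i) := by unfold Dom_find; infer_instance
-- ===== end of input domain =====

-- B replaces A's back-to-front recursion with slicing by a single forward scan (idiomatic, avoids copying).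


-- ===== PORT A =====
theorem dropLast_len_lt (l : List Int) (h : l ≠ []) : l.dropLast.length < l.length := by
  have : l.length ≠ 0 := by simpa using (List.length_eq_zero_iff.not.mpr h)
  simp [List.length_dropLast]; omega

-- literal port: empty check, then l[-1] == i, else recurse on l[0:-1]
def find (l : List Int) (i : Int) : Option Int :=
  if h : l = [] then none
  else if l.getLast h = i then some i
  else find (PySem.List.slice l (some 0) (some (-1))) i
termination_by l.length
decreasing_by
  simp only [PySem.List.slice_zero_start, PySem.List.slice_to_neg_one]
  exact dropLast_len_lt l h

-- ===== PORT B =====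
def find_alt (l : List Int) (i : Int) : Option Int :=
  match l with
  | [] => none
  | x :: xs => if x = i then some i else find_alt xs i

-- ===== PRECONDITION & SPEC =====
def Spec_find (l : List Int) (i : Int) (out : Option Int) : Prop := out = find_alt l i
instance (l : List Int) (i : Int) (out : Option Int) : Decidable (Spec_find l i out) := by unfold Spec_find; infer_instance

-- ===== CLAIM (what is proved, stated in full; the proofs are below) =====
def Claim_equal_find : Prop := ∀ (l : List Int) (i : Int), Dom_find l i → Spec_find l i (find l i)

-- ===== LEMMAS AND PROOFS =====

-- both programs compute "some i if i ∈ l else none"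
theorem find_alt_char (l : List Int) (i : Int) :
    find_alt l i = if i ∈ l then some i else none := by
  induction l with
  | nil => simp [find_alt]
  | cons x xs ih =>
    simp only [find_alt, ih, List.mem_cons]
    by_cases hx : x = i
    · simp [hx]
    · by_cases hm : i ∈ xs <;> simp [hx, hm, Ne.symm hx]

theorem find_char_aux (n : Nat) : ∀ (l : List Int) (i : Int), l.length ≤ n →
    find l i = if i ∈ l then some i else none := by
  induction n with
  | zero =>
    intro l i hn
    have : l = [] := by cases l <;> simp_all
    subst this; simp [find]
  | succ n ih =>
    intro l i hn
    by_cases h : l = []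
    · subst h; simp [find]
    · rw [find]
      simp only [dif_neg h]
      by_cases hl : l.getLast h = i
      · rw [if_pos hl, if_pos (hl ▸ List.getLast_mem h : i ∈ l)]
      · rw [if_neg hl, ih _ _ (by
          simp only [PySem.List.slice_zero_start, PySem.List.slice_to_neg_one]
          have := dropLast_len_lt l h; omega)]
        simp only [PySem.List.slice_zero_start, PySem.List.slice_to_neg_one]
        by_cases hm : i ∈ l.dropLast
        · simp [hm, List.mem_of_mem_dropLast hm]
        · rw [if_neg hm, if_neg]
          intro hmem
          rw [← List.dropLast_append_getLast h, List.mem_append, List.mem_singleton] at hmem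
          rcases hmem with h1 | h1
          · exact hm h1
          · exact hl h1.symm

theorem find_char (l : List Int) (i : Int) :
    find l i = if i ∈ l then some i else none :=
  find_char_aux l.length l i le_rfl

-- ===== VERDICT (by name: the statement is the Claim_ definition above) =====
theorem find_spec : Claim_equal_find := by
  intro l i _
  unfold Spec_find
  rw [find_char, find_alt_char]
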